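-- pv_equiv track=rewrite | github.com/tony-azevedo/FlyLearning | mapd/kinematics.py | _resolve_bout_end
-- ===== SOURCE A (Python) =====
-- STATE_REST  = 0
--
-- STATE_DRIFT = 1
--
-- def _resolve_bout_end(segs, t, fallback):
--     """
--     Find the sample index where a bout ends (first REST segment).
--
--     fallback : 'none'  → (None, False) when no REST found
--                'drift' → start of first DRIFT, or (None, False)
--                'end'   → last sample of the last segment
--     """
--     for seg in segs:
--         if seg['state'] == STATE_REST:
--             return seg['start'], True
--     if fallback == 'none':
--         return None, False
--     elif fallback == 'drift':
--         for seg in segs: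
--             if seg['state'] == STATE_DRIFT:
--                 return seg['start'], False
--         return None, False
--     else:  # 'end'
--         return segs[-1]['end'], False
-- ===== SOURCE B (Python) =====
-- STATE_REST  = 0
--
-- STATE_DRIFT = 1
--
-- def _resolve_bout_end(segs, t, fallback):
--     # One pass: record where the first REST and the first DRIFT start, then dispatch once.
--     first_rest = None
--     first_drift = None
--     for seg in segs:
--         st = seg['state']
--         if st == STATE_REST and first_rest is None:
--             first_rest = seg['start']
--         elif st == STATE_DRIFT and first_drift is None:
--             first_drift = seg['start']
--     if first_rest is not None:
--         return first_rest, True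
--     if fallback == 'none':
--         return None, False
--     if fallback == 'drift':
--         return first_drift, False
--     return segs[-1]['end'], False
-- ===== Notes on version B (the rewrite author's own statement) =====
-- stated objective: alternative
-- what changed: A re-scans segs per fallback branch (a REST scan, then possibly a second DRIFT scan); B makes one pass recording the first REST start and first DRIFT start and then dispatches once on what it found.
-- outside the precondition, e.g. on _resolve_bout_end([{'state': 0, 'start': 1}, {}], 0, 'none'): A returns (1, True), B raises KeyError; on _resolve_bout_end([{'state': 1}], 0, 'none'): A returns (None, False), B raises KeyError
import Mathlib
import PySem

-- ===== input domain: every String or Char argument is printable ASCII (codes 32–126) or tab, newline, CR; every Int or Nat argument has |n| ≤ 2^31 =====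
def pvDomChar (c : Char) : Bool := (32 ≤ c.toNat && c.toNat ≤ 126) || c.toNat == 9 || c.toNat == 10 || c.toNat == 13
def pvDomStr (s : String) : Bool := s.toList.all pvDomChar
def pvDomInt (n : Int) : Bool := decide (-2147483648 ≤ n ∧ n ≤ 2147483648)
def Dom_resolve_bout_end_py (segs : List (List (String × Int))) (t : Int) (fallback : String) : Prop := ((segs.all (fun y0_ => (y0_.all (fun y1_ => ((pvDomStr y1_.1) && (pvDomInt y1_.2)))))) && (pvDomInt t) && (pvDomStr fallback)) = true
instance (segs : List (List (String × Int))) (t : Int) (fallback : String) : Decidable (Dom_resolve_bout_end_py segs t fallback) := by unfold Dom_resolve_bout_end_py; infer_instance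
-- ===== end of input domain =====

-- B replaces A's per-branch re-scans of segs by a single pass that records
-- the first REST start and first DRIFT start, then dispatches once (objective: alternative).

-- first-match lookup in an association list (Python dict access seg[k]; none = KeyError)
def pvDget (seg : List (String × Int)) (k : String) : Option Int :=
  (seg.find? (fun p => p.1 == k)).map (fun p => p.2)

-- ===== PORT A =====
-- `for seg in segs: if seg['state'] == STATE_REST: return seg['start'], True`
def pvLoopRest : List (List (String × Int)) → Option (Option Int)
  | [] => none
  | seg :: rest =>
    if pvDget seg "state" == some 0 then some (pvDget seg "start") else pvLoopRest rest

-- the second loop: `for seg in segs: if seg['state'] == STATE_DRIFT: return seg['start'], False`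
def pvLoopDrift : List (List (String × Int)) → Option (Option Int)
  | [] => none
  | seg :: rest =>
    if pvDget seg "state" == some 1 then some (pvDget seg "start") else pvLoopDrift rest

def resolve_bout_end_py (segs : List (List (String × Int))) (t : Int) (fallback : String) : Option Int × Bool :=
  match pvLoopRest segs with
  | some s => (s, true)
  | none =>
    if fallback == "none" then (none, false)
    else if fallback == "drift" then
      match pvLoopDrift segs with
      | some s => (s, false)
      | none => (none, false)
    else ((PySem.List.pyGet? segs (-1)).bind (fun seg => pvDget seg "end"), false)

-- ===== PORT B =====
-- one pass: (first_rest, first_drift) accumulator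
def pvScan : List (List (String × Int)) → Option Int → Option Int → Option Int × Option Int
  | [], fr, fd => (fr, fd)
  | seg :: rest, fr, fd =>
    let st := pvDget seg "state"
    if st == some 0 && fr.isNone then pvScan rest (pvDget seg "start") fd
    else if st == some 1 && fd.isNone then pvScan rest fr (pvDget seg "start")
    else pvScan rest fr fd

def resolve_bout_end_py_alt (segs : List (List (String × Int))) (t : Int) (fallback : String) : Option Int × Bool :=
  let p := pvScan segs none none
  match p.1 with
  | some v => (some v, true)
  | none =>
    if fallback == "none" then (none, false)
    else if fallback == "drift" then (p.2, false)
    else ((PySem.List.pyGet? segs (-1)).bind (fun seg => pvDget seg "end"), false)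

-- ===== PRECONDITION & SPEC =====
-- Pre_ excludes exactly the inputs on which the Python A or B raises a KeyError/IndexError:
-- a segment missing 'state', the first REST or first DRIFT segment missing 'start', or
-- (when fallback is neither 'none' nor 'drift' and no REST exists) empty segs / last segment
-- missing 'end'.  A's early return can skip such a faulty segment and still return where
-- B's full pass raises (see claim cites).
def Pre_resolve_bout_end_py (segs : List (List (String × Int))) (t : Int) (fallback : String) : Prop :=
  (segs.all (fun seg => (pvDget seg "state").isSome) = true) ∧
  ((segs.find? (fun seg => pvDget seg "state" == some 0)).all (fun g => (pvDget g "start").isSome) = true) ∧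
  ((segs.find? (fun seg => pvDget seg "state" == some 1)).all (fun g => (pvDget g "start").isSome) = true) ∧
  (fallback ≠ "none" → fallback ≠ "drift" →
     segs.find? (fun seg => pvDget seg "state" == some 0) = none →
     ((PySem.List.pyGet? segs (-1)).bind (fun seg => pvDget seg "end")).isSome = true)
instance (segs : List (List (String × Int))) (t : Int) (fallback : String) : Decidable (Pre_resolve_bout_end_py segs t fallback) := by unfold Pre_resolve_bout_end_py; infer_instance

def pvWitness_resolve_bout_end_py : (List (List (String × Int))) × Int × String :=
  ([[("state", 0), ("start", 3)], [("state", 1), ("start", 5), ("end", 9)]], 0, "drift")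

def Spec_resolve_bout_end_py (segs : List (List (String × Int))) (t : Int) (fallback : String) (out : Option Int × Bool) : Prop := out = resolve_bout_end_py_alt segs t fallback
instance (segs : List (List (String × Int))) (t : Int) (fallback : String) (out : Option Int × Bool) : Decidable (Spec_resolve_bout_end_py segs t fallback out) := by unfold Spec_resolve_bout_end_py; infer_instance

-- ===== CLAIM (what is proved, stated in full; the proofs are below) =====
def Claim_equal_resolve_bout_end_py : Prop := ∀ (segs : List (List (String × Int))) (t : Int) (fallback : String), Dom_resolve_bout_end_py segs t fallback → Pre_resolve_bout_end_py segs t fallback → Spec_resolve_bout_end_py segs t fallback (resolve_bout_end_py segs t fallback)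

-- ===== LEMMAS AND PROOFS =====

-- A's first loop returns the 'start' of the first segment whose 'state' is 0
theorem loopRest_eq_find (segs : List (List (String × Int))) :
    pvLoopRest segs =
      (segs.find? (fun seg => pvDget seg "state" == some 0)).map (fun g => pvDget g "start") := by
  induction segs with
  | nil => rfl
  | cons seg rest ih =>
    simp only [pvLoopRest, List.find?]
    cases hst : (pvDget seg "state" == some 0) <;> simp [ih]

-- A's second loop returns the 'start' of the first segment whose 'state' is 1
theorem loopDrift_eq_find (segs : List (List (String × Int))) :
    pvLoopDrift segs =
      (segs.find? (fun seg => pvDget seg "state" == some 1)).map (fun g => pvDget g "start") := by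
  induction segs with
  | nil => rfl
  | cons seg rest ih =>
    simp only [pvLoopDrift, List.find?]
    cases hst : (pvDget seg "state" == some 1) <;> simp [ih]

-- once first_rest is set, the scan keeps it
theorem pvScan_fr_some (segs : List (List (String × Int))) (v : Int) (fd : Option Int) :
    (pvScan segs (some v) fd).1 = some v := by
  induction segs generalizing fd with
  | nil => rfl
  | cons seg rest ih =>
    simp only [pvScan, Option.isNone_some, Bool.and_false, Bool.false_eq_true, if_false]
    split <;> exact ih _

-- if A's first loop finds a REST segment (with a present 'start'),
-- the scan's first component is its start
theorem pvScan_of_rest (segs : List (List (String × Int)))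
    (s : Option Int) (h : pvLoopRest segs = some s) (hs : s.isSome) :
    ∀ fd, (pvScan segs none fd).1 = s := by
  induction segs with
  | nil => simp [pvLoopRest] at h
  | cons seg rest ih =>
    intro fd
    cases hst : (pvDget seg "state" == some 0) with
    | true =>
      have hseq : s = pvDget seg "start" := by
        simp only [pvLoopRest, hst, if_true] at h
        exact (Option.some.inj h).symm
      obtain ⟨v, hv⟩ := Option.isSome_iff_exists.mp (hseq ▸ hs)
      simp only [pvScan, hst, Option.isNone_none, Bool.and_true, if_true]
      rw [hseq, hv, pvScan_fr_some]
    | false =>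
      have h' : pvLoopRest rest = some s := by
        simp only [pvLoopRest, hst, Bool.false_eq_true, if_false] at h; exact h
      have ih' := ih h'
      simp only [pvScan, hst, Bool.false_and, Bool.false_eq_true, if_false]
      split
      · exact ih' _
      · exact ih' _

-- once first_drift is set (and no REST exists), the scan returns it unchanged
theorem pvScan_fd_some (segs : List (List (String × Int)))
    (hA : pvLoopRest segs = none) (v : Int) :
    pvScan segs none (some v) = (none, some v) := by
  induction segs with
  | nil => rfl
  | cons seg rest ih =>
    have hst : (pvDget seg "state" == some 0) = false := by
      by_contra hc
      simp only [Bool.not_eq_false] at hc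
      simp [pvLoopRest, hc] at hA
    have hA' : pvLoopRest rest = none := by
      simp only [pvLoopRest, hst, Bool.false_eq_true, if_false] at hA; exact hA
    simp only [pvScan, hst, Bool.false_and, Bool.false_eq_true, if_false,
      Option.isNone_some, Bool.and_false]
    exact ih hA'

-- no REST segment: the scan yields (none, start of first DRIFT)
theorem pvScan_no_rest (segs : List (List (String × Int)))
    (hA : pvLoopRest segs = none)
    (HD : ∀ s, pvLoopDrift segs = some s → s.isSome) :
    pvScan segs none none =
      (none, match pvLoopDrift segs with | some s => s | none => none) := by
  induction segs with
  | nil => rfl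
  | cons seg rest ih =>
    have hst : (pvDget seg "state" == some 0) = false := by
      by_contra hc
      simp only [Bool.not_eq_false] at hc
      simp [pvLoopRest, hc] at hA
    have hA' : pvLoopRest rest = none := by
      simp only [pvLoopRest, hst, Bool.false_eq_true, if_false] at hA; exact hA
    cases hd : (pvDget seg "state" == some 1) with
    | true =>
      have hsome : (pvDget seg "start").isSome :=
        HD _ (by simp [pvLoopDrift, hd])
      obtain ⟨v, hv⟩ := Option.isSome_iff_exists.mp hsome
      simp only [pvScan, hst, Bool.false_and, Bool.false_eq_true, if_false, hd,
        Option.isNone_none, Bool.and_true, if_true, pvLoopDrift, hv]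
      exact pvScan_fd_some rest hA' v
    | false =>
      have HD' : ∀ s, pvLoopDrift rest = some s → s.isSome := by
        intro s hsd
        exact HD s (by simp only [pvLoopDrift, hd, Bool.false_eq_true, if_false]; exact hsd)
      simp only [pvScan, hst, Bool.false_and, Bool.false_eq_true, if_false, hd, pvLoopDrift]
      exact ih hA' HD'

-- ===== VERDICT (by name: the statement is the Claim_ definition above) =====
theorem resolve_bout_end_py_spec : Claim_equal_resolve_bout_end_py := by
  intro segs t fallback _ hPre
  obtain ⟨-, hR, hD, -⟩ := hPre
  unfold Spec_resolve_bout_end_py resolve_bout_end_py resolve_bout_end_py_alt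
  cases hA : pvLoopRest segs with
  | some s =>
    have hs : s.isSome := by
      rw [loopRest_eq_find] at hA
      cases hfind : segs.find? (fun seg => pvDget seg "state" == some 0) with
      | none => rw [hfind] at hA; simp at hA
      | some g =>
        rw [hfind] at hA
        simp only [Option.map_some] at hA
        rw [hfind, Option.all_some] at hR
        exact (Option.some.inj hA) ▸ hR
    obtain ⟨v, hv⟩ := Option.isSome_iff_exists.mp hs
    have h1 := pvScan_of_rest segs s hA hs none
    simp [h1, hv]
  | none =>
    have HD : ∀ s, pvLoopDrift segs = some s → s.isSome := by
      intro s hsd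
      rw [loopDrift_eq_find] at hsd
      cases hfind : segs.find? (fun seg => pvDget seg "state" == some 1) with
      | none => rw [hfind] at hsd; simp at hsd
      | some g =>
        rw [hfind] at hsd
        simp only [Option.map_some] at hsd
        rw [hfind, Option.all_some] at hD
        exact (Option.some.inj hsd) ▸ hD
    rw [pvScan_no_rest segs hA HD]
    cases hDr : pvLoopDrift segs <;> split_ifs <;> simp [hDr]
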